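-- pv_equiv track=rewrite | github.com/MohammedAsadKhan/CipherShift | classic_ciphers.py | _build_rail_pattern
-- ===== SOURCE A (Python) =====
-- def _build_rail_pattern(n: int, rails: int) -> list:
--     """Build the zigzag rail assignment for n characters across given rails."""
--     pattern = []
--     rail = 0
--     direction = 1
--     for _ in range(n):
--         pattern.append(rail)
--         if rail == 0:
--             direction = 1
--         elif rail == rails - 1:
--             direction = -1
--         rail += direction
--     return pattern
-- ===== SOURCE B (Python) =====
-- def _build_rail_pattern(n: int, rails: int) -> list:
--     """Closed-form zigzag: each index is a distance-to-nearest-multiple of the period."""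
--     if rails <= 1:
--         return [0] * n
--     period = 2 * (rails - 1)
--     return [min(i % period, period - i % period) for i in range(n)]
-- ===== Notes on version B (the rewrite author's own statement) =====
-- stated objective: alternative
-- what changed: Replaces the rail/direction state-machine walk with a closed-form per-index formula (distance of i mod period to the nearest multiple of period = 2*(rails-1)), with an explicit all-zeros result for the degenerate rails<=1 case.
-- intended difference: For rails <= 1 and n >= 2, A's direction never flips so it returns [0,1,2,...,n-1] (rail indices that do not exist); B returns all zeros, the intended assignment when there is at most one rail. — e.g. on _build_rail_pattern(3, 1): A returns [0, 1, 2], B returns [0, 0, 0]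
import Mathlib
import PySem

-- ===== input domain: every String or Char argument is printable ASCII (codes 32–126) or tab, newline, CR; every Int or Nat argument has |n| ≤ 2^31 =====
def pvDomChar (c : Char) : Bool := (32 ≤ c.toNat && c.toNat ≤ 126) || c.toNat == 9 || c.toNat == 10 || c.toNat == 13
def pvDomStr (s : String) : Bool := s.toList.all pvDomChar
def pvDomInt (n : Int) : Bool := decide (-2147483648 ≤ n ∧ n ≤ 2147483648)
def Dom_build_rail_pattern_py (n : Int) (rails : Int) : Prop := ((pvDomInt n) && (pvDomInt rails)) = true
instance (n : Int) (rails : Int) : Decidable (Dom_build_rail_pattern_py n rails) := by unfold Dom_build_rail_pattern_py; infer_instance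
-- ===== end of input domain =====

-- B replaces A's rail/direction state machine by a closed-form per-index formula;
-- for rails ≤ 1 it returns all zeros where A walks off the rails (see D_ below).

-- ===== PORT A =====
-- one iteration of A's loop body over the state (pattern, rail, direction)

def railStep (rails : Int) (st : List Int × Int × Int) (_i : Int) : List Int × Int × Int :=
  let pattern := st.1 ++ [st.2.1]
  let direction : Int :=
    if st.2.1 = 0 then 1
    else if st.2.1 = rails - 1 then -1
    else st.2.2
  (pattern, st.2.1 + direction, direction)

def build_rail_pattern_py (n : Int) (rails : Int) : List Int :=
  ((PySem.List.pyRange 0 n 1).foldl (railStep rails) ([], 0, 1)).1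

-- ===== PORT B =====
def build_rail_pattern_py_alt (n : Int) (rails : Int) : List Int :=
  if rails ≤ 1 then
    -- [0] * n : empty for n ≤ 0, exactly Python's list repetition
    List.replicate n.toNat 0
  else
    let period := 2 * (rails - 1)
    (PySem.List.pyRange 0 n 1).map (fun i =>
      min (PySem.Int.mod i period) (period - PySem.Int.mod i period))

-- ===== PRECONDITION & SPEC =====
-- For rails <= 1 and n >= 2, A's direction never flips so it returns [0,1,...,n-1]
-- (rail indices that do not exist); B returns all zeros, the intended assignment
-- when there is at most one rail.
def D_build_rail_pattern_py (n : Int) (rails : Int) : Prop := rails ≤ 1 ∧ 2 ≤ n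
instance (n : Int) (rails : Int) : Decidable (D_build_rail_pattern_py n rails) := by
  unfold D_build_rail_pattern_py; infer_instance

def Spec_build_rail_pattern_py (n : Int) (rails : Int) (out : List Int) : Prop :=
  ¬ D_build_rail_pattern_py n rails → out = build_rail_pattern_py_alt n rails
instance (n : Int) (rails : Int) (out : List Int) : Decidable (Spec_build_rail_pattern_py n rails out) := by
  unfold Spec_build_rail_pattern_py; infer_instance

def pvDiffWitness_build_rail_pattern_py : Int × Int := (3, 1)
def pvDiffWitnessOut_build_rail_pattern_py : (List Int) × (List Int) := ([0, 1, 2], [0, 0, 0])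

-- ===== CLAIM (what is proved, stated in full; the proofs are below) =====
def Claim_unchanged_build_rail_pattern_py : Prop := ∀ (n : Int) (rails : Int), Dom_build_rail_pattern_py n rails → Spec_build_rail_pattern_py n rails (build_rail_pattern_py n rails)
def Claim_changed_build_rail_pattern_py : Prop := Dom_build_rail_pattern_py (pvDiffWitness_build_rail_pattern_py.1) (pvDiffWitness_build_rail_pattern_py.2) ∧ D_build_rail_pattern_py (pvDiffWitness_build_rail_pattern_py.1) (pvDiffWitness_build_rail_pattern_py.2) ∧ build_rail_pattern_py (pvDiffWitness_build_rail_pattern_py.1) (pvDiffWitness_build_rail_pattern_py.2) = pvDiffWitnessOut_build_rail_pattern_py.1 ∧ build_rail_pattern_py_alt (pvDiffWitness_build_rail_pattern_py.1) (pvDiffWitness_build_rail_pattern_py.2) = pvDiffWitnessOut_build_rail_pattern_py.2 ∧ pvDiffWitnessOut_build_rail_pattern_py.1 ≠ pvDiffWitnessOut_build_rail_pattern_py.2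
def Claim_exact_build_rail_pattern_py : Prop := ∀ (n : Int) (rails : Int), Dom_build_rail_pattern_py n rails → D_build_rail_pattern_py n rails → build_rail_pattern_py n rails ≠ build_rail_pattern_py_alt n rails

-- ===== LEMMAS AND PROOFS =====

-- closed-form rail of index k (B's formula, with Lean's emod; period = 2*(rails-1))
def railF (rails : Int) (k : Int) : Int :=
  min (k % (2 * (rails - 1))) (2 * (rails - 1) - k % (2 * (rails - 1)))

def railG (rails : Int) (k : Int) : Int :=
  if k = 0 then 1
  else if (k - 1) % (2 * (rails - 1)) < rails - 1 then 1 else -1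

theorem railStep_closed (rails : Int) (h2 : 2 ≤ rails) (k : Nat) :
    railStep rails (((PySem.List.pyRange 0 (k : Int) 1).map (railF rails)), railF rails (k : Int), railG rails (k : Int)) (k : Int)
    = ((PySem.List.pyRange 0 ((k : Int) + 1) 1).map (railF rails), railF rails ((k : Int) + 1), railG rails ((k : Int) + 1)) := by
  have hp : (0 : Int) < 2 * (rails - 1) := by omega
  have hm0 : 0 ≤ (k : Int) % (2 * (rails - 1)) := Int.emod_nonneg _ (by omega)
  have hmlt : (k : Int) % (2 * (rails - 1)) < 2 * (rails - 1) := Int.emod_lt_of_pos _ hp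
  have hdiv : (k : Int) = 2 * (rails - 1) * ((k : Int) / (2 * (rails - 1))) + (k : Int) % (2 * (rails - 1)) :=
    (Int.mul_ediv_add_emod _ _).symm
  have hsucc : ((k : Int) + 1) % (2 * (rails - 1)) =
      if (k : Int) % (2 * (rails - 1)) = 2 * (rails - 1) - 1 then 0 else (k : Int) % (2 * (rails - 1)) + 1 := by
    have h1 : ((k : Int) + 1) % (2 * (rails - 1)) = ((k : Int) % (2 * (rails - 1)) + 1) % (2 * (rails - 1)) := by
      conv_lhs => rw [hdiv]
      rw [show 2 * (rails - 1) * ((k : Int) / (2 * (rails - 1))) + (k : Int) % (2 * (rails - 1)) + 1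
            = ((k : Int) % (2 * (rails - 1)) + 1) + ((k : Int) / (2 * (rails - 1))) * (2 * (rails - 1)) by ring]
      rw [Int.add_mul_emod_self_right]
    rw [h1]
    split_ifs with he
    · rw [he]; simp
    · exact Int.emod_eq_of_lt (by omega) (by omega)
  have hmap : (PySem.List.pyRange 0 ((k : Int) + 1) 1).map (railF rails)
      = (PySem.List.pyRange 0 (k : Int) 1).map (railF rails) ++ [railF rails (k : Int)] := by
    rw [PySem.List.pyRange_one_succ_right (Int.natCast_nonneg k)]
    simp
  rcases Nat.eq_zero_or_pos k with hk | hk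
  · subst hk
    have hr1 : PySem.List.pyRange 0 1 1 = [0] := by decide
    have e0 : (0:Int) % (2*(rails-1)) = 0 := by simp
    have e1 : (1:Int) % (2*(rails-1)) = 1 := Int.emod_eq_of_lt (by omega) (by omega)
    simp only [Nat.cast_zero, railStep, railF, railG, Prod.ext_iff, zero_add, hr1]
    have hnil : PySem.List.pyRange 0 0 1 = [] := by decide
    simp only [hnil, sub_self, e1, List.map_nil, List.map_cons, List.nil_append, railF, e0, min_def]
    refine ⟨trivial, ?_, ?_⟩ <;> · split_ifs <;> omega
  · have hpred : ((k : Int) - 1) % (2 * (rails - 1)) =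
        if (k : Int) % (2 * (rails - 1)) = 0 then 2 * (rails - 1) - 1 else (k : Int) % (2 * (rails - 1)) - 1 := by
      have h1 : ((k : Int) - 1) % (2 * (rails - 1)) = ((k : Int) % (2 * (rails - 1)) - 1) % (2 * (rails - 1)) := by
        conv_lhs => rw [hdiv]
        rw [show 2 * (rails - 1) * ((k : Int) / (2 * (rails - 1))) + (k : Int) % (2 * (rails - 1)) - 1
              = ((k : Int) % (2 * (rails - 1)) - 1) + ((k : Int) / (2 * (rails - 1))) * (2 * (rails - 1)) by ring]
        rw [Int.add_mul_emod_self_right]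
      rw [h1]
      split_ifs with he
      · rw [he]
        rw [show (0 : Int) - 1 = (2 * (rails - 1) - 1) + (-1) * (2 * (rails - 1)) by ring, Int.add_mul_emod_self_right]
        exact Int.emod_eq_of_lt (by omega) (by omega)
      · exact Int.emod_eq_of_lt (by omega) (by omega)
    have hkne : ¬ ((k : Int) = 0) := by omega
    have hkne2 : ¬ ((k : Int) + 1 = 0) := by omega
    simp only [railStep, railF, railG, hmap, Prod.ext_iff]
    rw [hsucc, if_neg hkne, if_neg hkne2, hpred,
        show (k : Int) + 1 - 1 = (k : Int) from by ring]
    refine ⟨trivial, ?_, ?_⟩ <;>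
    · simp only [min_def]
      split_ifs <;> omega

theorem foldA_closed (rails : Int) (h2 : 2 ≤ rails) (k : Nat) :
    (PySem.List.pyRange 0 (k : Int) 1).foldl (railStep rails) ([], 0, 1)
      = ((PySem.List.pyRange 0 (k : Int) 1).map (railF rails), railF rails (k : Int), railG rails (k : Int)) := by
  induction k with
  | zero =>
    have hnil : PySem.List.pyRange 0 0 1 = [] := by decide
    have e0 : (0:Int) % (2*(rails-1)) = 0 := by simp
    simp [hnil, railF, railG, e0, min_eq_left (by omega : (0:Int) ≤ 2*(rails-1))]
  | succ k ih =>
    have hc : ((k + 1 : Nat) : Int) = (k : Int) + 1 := by push_cast; ring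
    rw [hc, PySem.List.pyRange_one_succ_right (Int.natCast_nonneg k), List.foldl_append, ih]
    simp only [List.foldl_cons, List.foldl_nil]
    rw [railStep_closed rails h2 k, PySem.List.pyRange_one_succ_right (Int.natCast_nonneg k)]

-- the pattern accumulator is only ever appended to
theorem foldA_prefix (rails : Int) (l : List Int) (pat : List Int) (r e : Int) :
    (l.foldl (railStep rails) (pat, r, e)).1 = pat ++ (l.foldl (railStep rails) ([], r, e)).1 := by
  induction l generalizing pat r e with
  | nil => simp
  | cons x xs ih =>
    simp only [List.foldl_cons, railStep, List.nil_append]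
    rw [ih (pat ++ [r]), ih [r]]
    simp

theorem ports_agree_of_two_rails (n rails : Int) (h2 : 2 ≤ rails) :
    build_rail_pattern_py n rails = build_rail_pattern_py_alt n rails := by
  have hmod : ∀ i : Int, PySem.Int.mod i (2 * (rails - 1)) = i % (2 * (rails - 1)) :=
    fun i => PySem.Int.mod_eq_emod_of_pos (by omega)
  unfold build_rail_pattern_py build_rail_pattern_py_alt
  rw [if_neg (by omega : ¬ rails ≤ 1)]
  simp only [hmod]
  rcases (by omega : n ≤ 0 ∨ 0 < n) with hn | hn
  · rw [PySem.List.pyRange_one_eq_nil hn]; simp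
  · have hk : ((n.toNat : Nat) : Int) = n := Int.toNat_of_nonneg (by omega)
    rw [← hk]
    exact congrArg Prod.fst (foldA_closed rails h2 n.toNat)

theorem ports_agree_small (n rails : Int) (h1 : rails ≤ 1) (hn : n ≤ 1) :
    build_rail_pattern_py n rails = build_rail_pattern_py_alt n rails := by
  unfold build_rail_pattern_py build_rail_pattern_py_alt
  rw [if_pos h1]
  rcases (by omega : n ≤ 0 ∨ 0 < n) with hn0 | hn0
  · rw [PySem.List.pyRange_one_eq_nil hn0, show n.toNat = 0 by omega]
    simp
  · have hn1 : n = 1 := by omega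
    subst hn1
    have hr1 : PySem.List.pyRange 0 1 1 = [0] := by decide
    rw [hr1]
    simp [railStep]

-- A's first two entries are 0, 1 whenever n ≥ 2 and rails ≤ 1
theorem portA_starts_01 (n rails : Int) (h1 : rails ≤ 1) (hn : 2 ≤ n) :
    ∃ t, build_rail_pattern_py n rails = 0 :: 1 :: t := by
  have hsplit : PySem.List.pyRange 0 n 1 = 0 :: 1 :: PySem.List.pyRange 2 n 1 := by
    rw [PySem.List.pyRange_one_cons (by omega : (0:Int) < n),
        show (0:Int) + 1 = 1 by ring,
        PySem.List.pyRange_one_cons (by omega : (1:Int) < n),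
        show (1:Int) + 1 = 2 by ring]
  unfold build_rail_pattern_py
  rw [hsplit]
  simp only [List.foldl_cons]
  have s1 : railStep rails ([], 0, 1) 0 = ([0], 1, 1) := by simp [railStep]
  have s2 : railStep rails ([0], 1, 1) 1 = ([0, 1], 2, 1) := by
    simp only [railStep]
    rw [if_neg (by omega : ¬ (1:Int) = 0), if_neg (by omega : ¬ (1:Int) = rails - 1)]
    norm_num
  rw [s1, s2, foldA_prefix]
  exact ⟨_, rfl⟩

-- ===== VERDICT (by name: the statement is the Claim_ definition above) =====
theorem build_rail_pattern_py_spec : Claim_unchanged_build_rail_pattern_py := by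
  intro n rails _ hd
  rcases (by omega : rails ≤ 1 ∨ 1 < rails) with h1 | h1
  · have hn : n ≤ 1 := by
      by_contra hc
      exact hd ⟨h1, by omega⟩
    exact ports_agree_small n rails h1 hn
  · exact ports_agree_of_two_rails n rails (by omega)

theorem build_rail_pattern_py_changed : Claim_changed_build_rail_pattern_py := by
  unfold Claim_changed_build_rail_pattern_py; decide

theorem build_rail_pattern_py_tight : Claim_exact_build_rail_pattern_py := by
  intro n rails _ hd hAB
  obtain ⟨h1, hn⟩ := hd
  obtain ⟨t, hA⟩ := portA_starts_01 n rails h1 hn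
  have hB : build_rail_pattern_py_alt n rails = List.replicate n.toNat 0 := by
    unfold build_rail_pattern_py_alt; rw [if_pos h1]
  have h1idx : (build_rail_pattern_py n rails)[1]? = (build_rail_pattern_py_alt n rails)[1]? := by
    rw [hAB]
  rw [hA, hB] at h1idx
  have h2n : 1 < n.toNat := by omega
  simp [h2n] at h1idx
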